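-- pv_equiv track=rewrite | github.com/seantan02/aitanmall | aitanmall.com/AI/main/helper.py | get_biggest_vocabulary_char_size
-- ===== SOURCE A (Python) =====
-- def tokenize(char_size, given_string):
--     tokenized_string = []
--
--     for index in range(len(given_string)):
--         sub_word = given_string[index:index+char_size]
--         tokenized_string.append(sub_word)
--
--     return tokenized_string
--
-- def get_biggest_vocabulary_char_size(given_string):
--     biggest_vocabulary = None
--     char_size = 1
--     while True:
--         vocab_size_increased=False
--         vocabulary = list(set(tokenize(char_size, given_string)))
--         if biggest_vocabulary == None or len(vocabulary) > len(biggest_vocabulary):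
--             biggest_vocabulary = vocabulary
--             vocab_size_increased = True
--         char_size += 2
--         if vocab_size_increased == False:
--             return char_size
-- ===== SOURCE B (Python) =====
-- def get_biggest_vocabulary_char_size(given_string):
--     n = len(given_string)
--     best = -1
--     char_size = 1
--     while True:
--         tokens = sorted(given_string[i:i + char_size] for i in range(n))
--         distinct = 0
--         prev = None
--         for token in tokens:
--             if prev is None or token != prev:
--                 distinct += 1
--             prev = token
--         if distinct <= best:
--             return char_size + 2
--         best = distinct
--         char_size += 2
-- ===== Notes on version B (the rewrite author's own statement) =====
-- stated objective: alternative
-- what changed: B replaces A's per-length hash-set vocabulary (list(set(tokenize(...))) kept as a list) with a sort-then-scan distinct count, keeping only the previous best count instead of the whole vocabulary.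
import Mathlib
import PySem

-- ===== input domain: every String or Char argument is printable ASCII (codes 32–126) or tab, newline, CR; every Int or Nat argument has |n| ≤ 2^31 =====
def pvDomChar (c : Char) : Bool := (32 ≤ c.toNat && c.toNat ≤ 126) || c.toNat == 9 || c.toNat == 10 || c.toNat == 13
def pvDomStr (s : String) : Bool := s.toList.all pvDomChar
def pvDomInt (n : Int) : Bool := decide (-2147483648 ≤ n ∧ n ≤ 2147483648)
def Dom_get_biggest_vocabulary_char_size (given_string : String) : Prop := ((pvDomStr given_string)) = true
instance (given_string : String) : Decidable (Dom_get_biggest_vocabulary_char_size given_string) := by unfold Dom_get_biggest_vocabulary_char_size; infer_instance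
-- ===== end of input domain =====

-- B replaces A's per-length hash-set vocabulary (list(set(...))) by a sort-then-scan distinct
-- count that keeps only the previous best count instead of the whole vocabulary list
-- (objective: alternative; same stop rule, different distinct-counting algorithm).

-- ===== PORT A =====

-- tokenize(char_size, given_string): list of s[i:i+char_size] built by appending in a loop
def tokenizeA (char_size : Int) (s : List Char) : List (List Char) :=
  (List.range s.length).foldl
    (fun acc index =>
      acc ++ [PySem.List.slice s (some (index : Int)) (some ((index : Int) + char_size))]) []

-- facts the loop's termination measure needs (cited by decreasing_by)
theorem tokenizeA_length (char_size : Int) (s : List Char) :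
    (tokenizeA char_size s).length = s.length := by
  unfold tokenizeA
  rw [PySem.List.foldl_append_singleton_eq_map]
  simp

theorem setOfList_length_eq_card {α : Type} [BEq α] [LawfulBEq α] [DecidableEq α] (xs : List α) :
    (PySem.Set.ofList xs).length = xs.toFinset.card := by
  have h2 : (PySem.Set.ofList xs).toFinset = xs.toFinset := by
    apply Finset.ext
    intro a
    simp [List.mem_toFinset, PySem.Set.mem_ofList]
  rw [← List.toFinset_card_of_nodup (PySem.Set.nodup_ofList xs), h2]

theorem setOfList_length_le {α : Type} [BEq α] [LawfulBEq α] [DecidableEq α] (xs : List α) :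
    (PySem.Set.ofList xs).length ≤ xs.length := by
  rw [setOfList_length_eq_card]
  exact xs.toFinset_card_le

theorem decA (s : List Char) (char_size : Int) :
    s.length + 1 - (PySem.Set.ofList (tokenizeA char_size s)).length < s.length + 2 := by
  have := setOfList_length_le (tokenizeA char_size s)
  rw [tokenizeA_length] at this
  omega

theorem decA2 (s : List Char) (char_size : Int) (b : PySem.Set (List Char))
    (h : b.length < (PySem.Set.ofList (tokenizeA char_size s)).length) :
    s.length + 1 - (PySem.Set.ofList (tokenizeA char_size s)).length
      < s.length + 1 - b.length := by
  have := setOfList_length_le (tokenizeA char_size s)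
  rw [tokenizeA_length] at this
  omega

-- the `while True` loop of A: state = (biggest_vocabulary, char_size)
def loopA (s : List Char) (biggest : Option (PySem.Set (List Char))) (char_size : Int) : Int :=
  match biggest with
  | none => loopA s (some (PySem.Set.ofList (tokenizeA char_size s))) (char_size + 2)
  | some b =>
      if b.length < (PySem.Set.ofList (tokenizeA char_size s)).length then
        loopA s (some (PySem.Set.ofList (tokenizeA char_size s))) (char_size + 2)
      else char_size + 2
termination_by match biggest with
  | none => s.length + 2
  | some b => s.length + 1 - b.length
decreasing_by
  · exact decA s char_size
  · exact decA2 s char_size b ‹_›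

def get_biggest_vocabulary_char_size (given_string : String) : Int :=
  loopA given_string.toList none 1

-- ===== PORT B =====

-- sorted(given_string[i:i+char_size] for i in range(n))
def tokensB (s : List Char) (char_size : Int) : List (List Char) :=
  PySem.List.sorted
    ((List.range s.length).map
      (fun i => PySem.List.slice s (some (i : Int)) (some ((i : Int) + char_size))))
    (fun t => t) false


-- the inner `for token in tokens` scan: state = (distinct, prev)
def scanB (tokens : List (List Char)) : Int × Option (List Char) :=
  tokens.foldl
    (fun st token =>
      (if st.2 = none ∨ st.2 ≠ some token then st.1 + 1 else st.1, some token))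
    (0, none)

-- facts B's termination measure needs (cited by decreasing_by)
theorem scanB_fst_nonneg_le (tokens : List (List Char)) :
    0 ≤ (scanB tokens).1 ∧ (scanB tokens).1 ≤ (tokens.length : Int) := by
  unfold scanB
  suffices h : ∀ (l : List (List Char)) (d : Int) (p : Option (List Char)),
      d ≤ (l.foldl (fun st token =>
        (if st.2 = none ∨ st.2 ≠ some token then st.1 + 1 else st.1, some token)) (d, p)).1 ∧
      (l.foldl (fun st token =>
        (if st.2 = none ∨ st.2 ≠ some token then st.1 + 1 else st.1, some token)) (d, p)).1
        ≤ d + (l.length : Int) by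
    have := h tokens 0 none
    constructor <;> [exact this.1; simpa using this.2]
  intro l
  induction l with
  | nil => intro d p; simp
  | cons t ts ih =>
      intro d p
      simp only [List.foldl_cons]
      split
      · have := ih (d + 1) (some t); simp at this ⊢; omega
      · have := ih d (some t); simp at this ⊢; omega

theorem tokensB_length (s : List Char) (char_size : Int) :
    (tokensB s char_size).length = s.length := by
  unfold tokensB
  rw [PySem.List.length_sorted]
  simp

theorem decB (s : List Char) (best char_size : Int)
    (h : ¬ (scanB (tokensB s char_size)).1 ≤ best) :
    ((s.length : Int) + 1 - (scanB (tokensB s char_size)).1).toNat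
      < ((s.length : Int) + 1 - best).toNat := by
  have hb := scanB_fst_nonneg_le (tokensB s char_size)
  rw [tokensB_length] at hb
  omega

-- the `while True` loop of B: state = (best, char_size)
def loopB (s : List Char) (best : Int) (char_size : Int) : Int :=
  if (scanB (tokensB s char_size)).1 ≤ best then char_size + 2
  else loopB s ((scanB (tokensB s char_size)).1) (char_size + 2)
termination_by ((s.length : Int) + 1 - best).toNat
decreasing_by
  exact decB s best char_size ‹_›

def get_biggest_vocabulary_char_size_alt (given_string : String) : Int :=
  loopB given_string.toList (-1) 1

-- ===== PRECONDITION & SPEC =====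
def Spec_get_biggest_vocabulary_char_size (given_string : String) (out : Int) : Prop := out = get_biggest_vocabulary_char_size_alt given_string
instance (given_string : String) (out : Int) : Decidable (Spec_get_biggest_vocabulary_char_size given_string out) := by unfold Spec_get_biggest_vocabulary_char_size; infer_instance

-- ===== CLAIM (what is proved, stated in full; the proofs are below) =====
def Claim_equal_get_biggest_vocabulary_char_size : Prop := ∀ (given_string : String), Dom_get_biggest_vocabulary_char_size given_string → Spec_get_biggest_vocabulary_char_size given_string (get_biggest_vocabulary_char_size given_string)

-- ===== LEMMAS AND PROOFS =====

-- one-step unfolding equations for the two loops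
theorem loopA_none (s : List Char) (char_size : Int) :
    loopA s none char_size
      = loopA s (some (PySem.Set.ofList (tokenizeA char_size s))) (char_size + 2) := by
  rw [loopA.eq_def]

theorem loopA_grow (s : List Char) (char_size : Int) (b : PySem.Set (List Char))
    (h : b.length < (PySem.Set.ofList (tokenizeA char_size s)).length) :
    loopA s (some b) char_size
      = loopA s (some (PySem.Set.ofList (tokenizeA char_size s))) (char_size + 2) := by
  rw [loopA.eq_def]; simp [h]

theorem loopA_stop (s : List Char) (char_size : Int) (b : PySem.Set (List Char))
    (h : ¬ b.length < (PySem.Set.ofList (tokenizeA char_size s)).length) :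
    loopA s (some b) char_size = char_size + 2 := by
  rw [loopA.eq_def]; simp [h]

theorem loopB_step (s : List Char) (best char_size : Int)
    (h : ¬ (scanB (tokensB s char_size)).1 ≤ best) :
    loopB s best char_size = loopB s ((scanB (tokensB s char_size)).1) (char_size + 2) := by
  rw [loopB.eq_def]; simp [h]

theorem loopB_stop (s : List Char) (best char_size : Int)
    (h : (scanB (tokensB s char_size)).1 ≤ best) :
    loopB s best char_size = char_size + 2 := by
  rw [loopB.eq_def]; simp [h]

-- mathematical form of B's scan
def cnt (prev : Option (List Char)) : List (List Char) → Nat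
  | [] => 0
  | t :: ts => (if prev = some t then 0 else 1) + cnt (some t) ts

theorem scanB_eq_cnt_aux (l : List (List Char)) :
    ∀ (d : Int) (p : Option (List Char)),
      (l.foldl (fun st token =>
        (if st.2 = none ∨ st.2 ≠ some token then st.1 + 1 else st.1, some token)) (d, p)).1
      = d + (cnt p l : Int) := by
  induction l with
  | nil => intro d p; simp [cnt]
  | cons t ts ih =>
      intro d p
      simp only [List.foldl_cons, cnt]
      by_cases hp : p = some t
      · have : ¬ (p = none ∨ p ≠ some t) := by simp [hp]
        rw [if_neg this, ih, hp]
        simp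
      · have : (p = none ∨ p ≠ some t) := Or.inr hp
        rw [if_pos this, ih]
        simp [hp]
        ring

theorem scanB_eq_cnt (l : List (List Char)) : (scanB l).1 = (cnt none l : Int) := by
  unfold scanB
  rw [scanB_eq_cnt_aux]
  simp

theorem card_insert_helper (t : List Char) (s : Finset (List Char)) :
    (insert t s).card = 1 + (s.erase t).card := by
  by_cases ht : t ∈ s
  · rw [Finset.insert_eq_self.mpr ht, Finset.card_erase_of_mem ht]
    have : 1 ≤ s.card := Finset.card_pos.mpr ⟨t, ht⟩
    omega
  · rw [Finset.card_insert_of_notMem ht, Finset.erase_eq_of_notMem ht]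
    omega

-- on a ≤-sorted list the scan counts exactly the distinct elements
theorem cnt_some_sorted (l : List (List Char)) (hp : l.Pairwise (· ≤ ·)) :
    ∀ p, (∀ x ∈ l, p ≤ x) → cnt (some p) l = (l.toFinset.erase p).card := by
  induction l with
  | nil => intro p _; simp [cnt]
  | cons t ts ih =>
      intro p hlb
      have hts : ts.Pairwise (· ≤ ·) := hp.of_cons
      have htle : ∀ x ∈ ts, t ≤ x := fun x hx => (List.pairwise_cons.mp hp).1 x hx
      have hih := ih hts t htle
      by_cases hpt : p = t
      · rw [hpt]
        rw [show cnt (some t) (t :: ts) = cnt (some t) ts by simp [cnt],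
            hih, List.toFinset_cons, Finset.erase_insert_eq_erase]
      · have hpnot : p ∉ (t :: ts).toFinset := by
          simp only [List.toFinset_cons, Finset.mem_insert, List.mem_toFinset]
          rintro (h | h)
          · exact hpt h
          · exact hpt (le_antisymm (hlb t List.mem_cons_self) (htle p h))
        rw [show cnt (some p) (t :: ts) = 1 + cnt (some t) ts by simp [cnt, hpt],
            hih, Finset.erase_eq_of_notMem hpnot, List.toFinset_cons, card_insert_helper]

theorem cnt_none_sorted (l : List (List Char)) (hp : l.Pairwise (· ≤ ·)) :
    cnt none l = l.toFinset.card := by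
  cases l with
  | nil => simp [cnt]
  | cons t ts =>
      have hts : ts.Pairwise (· ≤ ·) := hp.of_cons
      have htle : ∀ x ∈ ts, t ≤ x := fun x hx => (List.pairwise_cons.mp hp).1 x hx
      rw [show cnt none (t :: ts) = 1 + cnt (some t) ts by simp [cnt],
          cnt_some_sorted ts hts t htle, List.toFinset_cons, card_insert_helper]

-- the two per-char_size distinct counts agree
theorem distinct_eq (s : List Char) (char_size : Int) :
    (scanB (tokensB s char_size)).1
      = ((PySem.Set.ofList (tokenizeA char_size s)).length : Int) := by
  have htok : tokenizeA char_size s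
      = (List.range s.length).map
          (fun i => PySem.List.slice s (some (i : Int)) (some ((i : Int) + char_size))) := by
    unfold tokenizeA
    rw [PySem.List.foldl_append_singleton_eq_map]
    simp
  have hperm : (tokensB s char_size).Perm (tokenizeA char_size s) := by
    rw [htok]; exact PySem.List.sorted_perm _ _ _
  have hpair : (tokensB s char_size).Pairwise (· ≤ ·) := by
    have hinst : (fun (a b : List Char) => a.decidableLT b)
        = (LinearOrder.toDecidableLT : DecidableLT (List Char)) :=
      funext fun a => funext fun b => Subsingleton.elim _ _
    unfold tokensB
    rw [hinst]
    exact PySem.List.sorted_pairwise _ (fun t : List Char => t)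
  rw [scanB_eq_cnt, cnt_none_sorted (tokensB s char_size) hpair,
      setOfList_length_eq_card (tokenizeA char_size s), List.toFinset_eq_of_perm _ _ hperm]

-- the two loops agree, relating A's kept vocabulary to B's kept count
theorem loop_eq (s : List Char) :
    ∀ (biggest : Option (PySem.Set (List Char))) (char_size : Int),
      loopA s biggest char_size
        = loopB s (match biggest with
                   | none => -1
                   | some b => (b.length : Int)) char_size := by
  intro biggest char_size
  induction biggest, char_size using loopA.induct s with
  | case1 char_size ih =>
      have hd := distinct_eq s char_size
      have hge : (0 : Int) ≤ (scanB (tokensB s char_size)).1 :=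
        (scanB_fst_nonneg_le _).1
      have ih' : loopA s (some (PySem.Set.ofList (tokenizeA char_size s))) (char_size + 2)
          = loopB s (((PySem.Set.ofList (tokenizeA char_size s)).length : Int))
              (char_size + 2) := ih
      show loopA s none char_size = loopB s (-1) char_size
      rw [loopA_none, loopB_step s _ _ (by omega), hd]
      exact ih'
  | case2 char_size b hlt ih =>
      have hd := distinct_eq s char_size
      have ih' : loopA s (some (PySem.Set.ofList (tokenizeA char_size s))) (char_size + 2)
          = loopB s (((PySem.Set.ofList (tokenizeA char_size s)).length : Int))
              (char_size + 2) := ih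
      show loopA s (some b) char_size = loopB s ((b.length : Int)) char_size
      rw [loopA_grow s char_size b hlt, loopB_step s _ _ (by omega), hd]
      exact ih'
  | case3 char_size b hnlt =>
      have hd := distinct_eq s char_size
      show loopA s (some b) char_size = loopB s ((b.length : Int)) char_size
      rw [loopA_stop s char_size b hnlt, loopB_stop s _ _ (by omega)]

-- ===== VERDICT (by name: the statement is the Claim_ definition above) =====
theorem get_biggest_vocabulary_char_size_spec : Claim_equal_get_biggest_vocabulary_char_size := by
  intro given_string _
  unfold Spec_get_biggest_vocabulary_char_size
  unfold get_biggest_vocabulary_char_size get_biggest_vocabulary_char_size_alt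
  exact loop_eq given_string.toList none 1
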